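-- pv_equiv track=rewrite | github.com/Jl5her/AdventOfCode | 2015/day-03/solution.py | part2
-- ===== SOURCE A (Python) =====
-- def part2(string):
--     a = ["0,0"]
--     c = 1
--     p = [ [0,0], [0, 0]]
--     for s in string:
--         if s == "^":
--             p[0 if c > 0 else 1][1] += 1
--         if s == ">":
--             p[0 if c > 0 else 1][0] += 1
--         if s == "v":
--             p[0 if c > 0 else 1][1] -= 1
--         if s == "<":
--             p[0 if c > 0 else 1][0] -= 1
--         a.append( str(p[0][0]) + "," + str(p[0][1]) )
--         a.append( str(p[1][0]) + "," + str(p[1][1]) )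
--         c *= -1
--     return len(set(a))
-- ===== SOURCE B (Python) =====
-- def part2(string):
--     visited = {"0,0"}
--     for moves in (string[0::2], string[1::2]):
--         x = y = 0
--         for ch in moves:
--             if ch == "^":
--                 y += 1
--             elif ch == ">":
--                 x += 1
--             elif ch == "v":
--                 y -= 1
--             elif ch == "<":
--                 x -= 1
--             visited.add(str(x) + "," + str(y))
--     return len(visited)
-- ===== Notes on version B (the rewrite author's own statement) =====
-- stated objective: simpler
-- what changed: Replaces A's single interleaved loop with a parity flag, a mutable two-santa position table and a list that re-appends both santas' cell strings every step (deduplicated only at the end), by seeding a set with the origin and walking the two index-parity slices (string[0::2], string[1::2]) in two separate per-santa passes, adding only the moving santa's cell each step.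
import Mathlib
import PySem

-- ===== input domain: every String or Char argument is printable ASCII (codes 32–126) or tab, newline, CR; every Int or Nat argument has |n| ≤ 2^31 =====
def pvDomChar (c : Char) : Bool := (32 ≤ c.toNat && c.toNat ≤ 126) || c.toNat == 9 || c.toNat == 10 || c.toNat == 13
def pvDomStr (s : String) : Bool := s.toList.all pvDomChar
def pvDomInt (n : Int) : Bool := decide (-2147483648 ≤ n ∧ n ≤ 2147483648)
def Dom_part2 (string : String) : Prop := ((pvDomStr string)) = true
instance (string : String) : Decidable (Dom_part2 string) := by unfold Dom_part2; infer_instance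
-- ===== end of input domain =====

-- B replaces A's interleaved parity-flag loop (which re-appends both santas' cells every step)
-- by seeding the set with the origin and walking the two index-parity slices in separate passes; objective: simpler.

-- ===== PORT A =====
-- "x,y" cell key, = str(x) + "," + str(y) on the List Char side (strings ported as char lists)
def pvEnc (x y : Int) : List Char := PySem.Int.toChars x ++ ',' :: PySem.Int.toChars y

-- p[i][coord] += d for the 2-element list p of [x,y] pairs (i is the literal 0/1 A computes)
def pvBump (p : (Int × Int) × (Int × Int)) (i : Nat) (f : Int × Int → Int × Int) :
    (Int × Int) × (Int × Int) :=
  if i = 0 then (f p.1, p.2) else (p.1, f p.2)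

-- one iteration of A's for-loop: state (a, c, p)
def pvStepA (st : List (List Char) × Int × ((Int × Int) × (Int × Int))) (s : Char) :
    List (List Char) × Int × ((Int × Int) × (Int × Int)) :=
  let a := st.1
  let c := st.2.1
  let p := st.2.2
  let i : Nat := if c > 0 then 0 else 1
  let p := if s = '^' then pvBump p i (fun q => (q.1, q.2 + 1)) else p
  let p := if s = '>' then pvBump p i (fun q => (q.1 + 1, q.2)) else p
  let p := if s = 'v' then pvBump p i (fun q => (q.1, q.2 - 1)) else p
  let p := if s = '<' then pvBump p i (fun q => (q.1 - 1, q.2)) else p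
  let a := a ++ [pvEnc p.1.1 p.1.2]
  let a := a ++ [pvEnc p.2.1 p.2.2]
  (a, c * -1, p)

def part2 (string : String) : Int :=
  let st := string.toList.foldl pvStepA ([['0', ',', '0']], 1, ((0, 0), (0, 0)))
  ((PySem.Set.ofList st.1).length : Int)

-- ===== PORT B =====
-- apply one move character (^ > v <, anything else ignored)
def pvMove (p : Int × Int) (ch : Char) : Int × Int :=
  if ch = '^' then (p.1, p.2 + 1)
  else if ch = '>' then (p.1 + 1, p.2)
  else if ch = 'v' then (p.1, p.2 - 1)
  else if ch = '<' then (p.1 - 1, p.2)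
  else p

-- one iteration of B's inner loop: move, then visited.add(str(x) + "," + str(y))
def pvStepB (st : PySem.Set (List Char) × (Int × Int)) (ch : Char) :
    PySem.Set (List Char) × (Int × Int) :=
  let p := pvMove st.2 ch
  (st.1.add (pvEnc p.1 p.2), p)

def part2_alt (string : String) : Int :=
  let cs := string.toList
  let s0 := (PySem.List.slice? cs (some 0) none 2).getD []   -- string[0::2]; step 2 ≠ 0, never none
  let s1 := (PySem.List.slice? cs (some 1) none 2).getD []   -- string[1::2]
  let v0 : PySem.Set (List Char) := PySem.Set.ofList [['0', ',', '0']]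
  let v1 := (s0.foldl pvStepB (v0, ((0 : Int), (0 : Int)))).1
  let v2 := (s1.foldl pvStepB (v1, ((0 : Int), (0 : Int)))).1
  ((v2.length : Nat) : Int)

-- ===== PRECONDITION & SPEC =====
def Spec_part2 (string : String) (out : Int) : Prop := out = part2_alt string
instance (string : String) (out : Int) : Decidable (Spec_part2 string out) := by unfold Spec_part2; infer_instance

-- ===== CLAIM (what is proved, stated in full; the proofs are below) =====
def Claim_equal_part2 : Prop := ∀ (string : String), Dom_part2 string → Spec_part2 string (part2 string)

-- ===== LEMMAS AND PROOFS =====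

-- (evens, odds) of a list by index parity: pvDeal l = (l[0::2], l[1::2])
def pvDeal {α : Type} : List α → List α × List α
  | [] => ([], [])
  | a :: t => (a :: (pvDeal t).2, (pvDeal t).1)

-- positions after each character of a walk starting at p
def pvTrail (p : Int × Int) : List Char → List (Int × Int)
  | [] => []
  | ch :: t => pvMove p ch :: pvTrail (pvMove p ch) t

def pvEncP (q : Int × Int) : List Char := pvEnc q.1 q.2

theorem pvStepA_pos (a : List (List Char)) (p0 p1 : Int × Int) (s : Char) :
    pvStepA (a, 1, (p0, p1)) s =
      (a ++ [pvEncP (pvMove p0 s)] ++ [pvEncP p1], -1, (pvMove p0 s, p1)) := by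
  by_cases h1 : s = '^' <;> by_cases h2 : s = '>' <;> by_cases h3 : s = 'v' <;>
    by_cases h4 : s = '<' <;> simp_all [pvStepA, pvBump, pvMove, pvEncP]

theorem pvStepA_neg (a : List (List Char)) (p0 p1 : Int × Int) (s : Char) :
    pvStepA (a, -1, (p0, p1)) s =
      (a ++ [pvEncP p0] ++ [pvEncP (pvMove p1 s)], 1, (p0, pvMove p1 s)) := by
  by_cases h1 : s = '^' <;> by_cases h2 : s = '>' <;> by_cases h3 : s = 'v' <;>
    by_cases h4 : s = '<' <;> simp_all [pvStepA, pvBump, pvMove, pvEncP]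

-- what A's loop accumulates, as a membership characterisation (both parity phases at once)
theorem pvA_mem (x : List Char) : ∀ (l : List Char) (a : List (List Char)) (p0 p1 : Int × Int),
    (x ∈ (List.foldl pvStepA (a, 1, (p0, p1)) l).1 ↔
      x ∈ a ∨ x ∈ (pvTrail p0 (pvDeal l).1).map pvEncP ∨
        x ∈ (pvTrail p1 (pvDeal l).2).map pvEncP ∨ (l ≠ [] ∧ x = pvEncP p1))
  ∧ (x ∈ (List.foldl pvStepA (a, -1, (p0, p1)) l).1 ↔
      x ∈ a ∨ x ∈ (pvTrail p1 (pvDeal l).1).map pvEncP ∨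
        x ∈ (pvTrail p0 (pvDeal l).2).map pvEncP ∨ (l ≠ [] ∧ x = pvEncP p0)) := by
  intro l
  induction l with
  | nil => intro a p0 p1; simp [pvDeal, pvTrail]
  | cons ch t ih =>
    intro a p0 p1
    constructor
    · rw [List.foldl_cons, pvStepA_pos,
        (ih (a ++ [pvEncP (pvMove p0 ch)] ++ [pvEncP p1]) (pvMove p0 ch) p1).2]
      simp only [pvDeal, pvTrail, List.map_cons, List.mem_cons, List.mem_append, ne_eq, List.cons_ne_nil, not_false_eq_true, true_and]
      tauto
    · rw [List.foldl_cons, pvStepA_neg,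
        (ih (a ++ [pvEncP p0] ++ [pvEncP (pvMove p1 ch)]) p0 (pvMove p1 ch)).1]
      simp only [pvDeal, pvTrail, List.map_cons, List.mem_cons, List.mem_append, ne_eq, List.cons_ne_nil, not_false_eq_true, true_and]
      tauto

-- what B's inner loop accumulates
theorem pvB_mem (x : List Char) : ∀ (l : List Char) (v : PySem.Set (List Char)) (p : Int × Int),
    (x ∈ (List.foldl pvStepB (v, p) l).1 ↔ x ∈ v ∨ x ∈ (pvTrail p l).map pvEncP) := by
  intro l
  induction l with
  | nil => intro v p; simp [pvTrail]
  | cons ch t ih =>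
    intro v p
    rw [List.foldl_cons]
    show x ∈ (List.foldl pvStepB ((v.add (pvEncP (pvMove p ch))), pvMove p ch) t).1 ↔ _
    rw [ih]
    simp only [PySem.Set.mem_add, pvTrail, List.map_cons, List.mem_cons]
    tauto

theorem pvB_nodup : ∀ (l : List Char) (v : PySem.Set (List Char)) (p : Int × Int),
    v.Nodup → ((List.foldl pvStepB (v, p) l).1).Nodup := by
  intro l
  induction l with
  | nil => intro v p h; exact h
  | cons ch t ih =>
    intro v p h
    rw [List.foldl_cons]
    exact ih _ _ (PySem.Set.nodup_add v _ h)

-- slice-by-2 lemmas: filterMap form of slice? with step 2 equals the parity split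
theorem pvFM (t : List Char) :
    List.filterMap (fun k => t[2 * k]?) (List.range ((t.length + 1) / 2)) = (pvDeal t).1
  ∧ List.filterMap (fun k => t[2 * k + 1]?) (List.range (t.length / 2)) = (pvDeal t).2 := by
  induction t with
  | nil => simp [pvDeal]
  | cons a t ih =>
    constructor
    · rw [show ((a :: t).length + 1) / 2 = t.length / 2 + 1 from by
        simp [List.length_cons]; omega]
      rw [List.range_succ_eq_map, List.filterMap_cons, List.filterMap_map]
      have hf : ((fun k => (a :: t)[2 * k]?) ∘ Nat.succ) = fun k => t[2 * k + 1]? := by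
        funext k
        show (a :: t)[2 * (k + 1)]? = t[2 * k + 1]?
        rw [show 2 * (k + 1) = (2 * k + 1) + 1 from by omega]
        simp
      rw [hf, ih.2]
      simp [pvDeal]
    · rw [show (a :: t).length / 2 = (t.length + 1) / 2 from by simp [List.length_cons]]
      have hf : (fun k => (a :: t)[2 * k + 1]?) = fun k => t[2 * k]? := by
        funext k; simp
      rw [hf, ih.1]
      simp [pvDeal]

theorem pvSlice0 (cs : List Char) :
    PySem.List.slice? cs (some 0) none 2 = some (pvDeal cs).1 := by
  unfold PySem.List.slice? PySem.List.sliceIndices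
  norm_num
  have hc : (if 0 < cs.length then (((cs.length : Int) + 2 - 1) / 2).toNat else 0)
      = (cs.length + 1) / 2 := by split_ifs <;> omega
  rw [hc]
  have hf : (fun k : Nat => cs[(2 * (k : Int)).toNat]?) = fun k : Nat => cs[2 * k]? := by
    funext k
    rw [show (2 * (k : Int)).toNat = 2 * k from by omega]
  rw [hf, (pvFM cs).1]

theorem pvSlice1 (cs : List Char) :
    PySem.List.slice? cs (some 1) none 2 = some (pvDeal cs).2 := by
  unfold PySem.List.slice? PySem.List.sliceIndices
  norm_num
  rcases Nat.eq_zero_or_pos cs.length with h0 | hpos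
  · rw [h0]
    norm_num
    cases cs with
    | nil => simp [pvDeal]
    | cons a t => simp at h0
  · rw [show (min 1 (cs.length : Int)) = 1 from by omega]
    have hc : (if 1 < cs.length then (((cs.length : Int) - 1 + 2 - 1) / 2).toNat else 0)
        = cs.length / 2 := by split_ifs <;> omega
    rw [hc]
    have hf : (fun k : Nat => cs[(1 + 2 * (k : Int)).toNat]?) = fun k : Nat => cs[2 * k + 1]? := by
      funext k
      rw [show (1 + 2 * (k : Int)).toNat = 2 * k + 1 from by omega]
    rw [hf, (pvFM cs).2]

-- ===== VERDICT (by name: the statement is the Claim_ definition above) =====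
theorem part2_spec : Claim_equal_part2 := by
  unfold Claim_equal_part2
  intro s _
  unfold Spec_part2
  show part2 s = part2_alt s
  unfold part2 part2_alt
  simp only [pvSlice0, pvSlice1, Option.getD_some]
  set cs := s.toList with hcs
  set LA : List (List Char) :=
    PySem.Set.ofList (List.foldl pvStepA ([['0', ',', '0']], 1, ((0, 0), (0, 0))) cs).1 with hLA
  set LB : List (List Char) :=
    (List.foldl pvStepB
      ((List.foldl pvStepB (PySem.Set.ofList [['0', ',', '0']], ((0 : Int), (0 : Int)))
        (pvDeal cs).1).1, ((0 : Int), (0 : Int))) (pvDeal cs).2).1 with hLB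
  have hNA : LA.Nodup := PySem.Set.nodup_ofList _
  have hNB : LB.Nodup := by
    apply pvB_nodup
    apply pvB_nodup
    exact PySem.Set.nodup_ofList _
  have horigin : pvEncP ((0 : Int), (0 : Int)) = ['0', ',', '0'] := by decide
  have hfin : LA.toFinset = LB.toFinset := by
    ext x
    simp only [List.mem_toFinset, hLA, hLB]
    rw [PySem.Set.mem_ofList, (pvA_mem x cs [['0', ',', '0']] (0, 0) (0, 0)).1,
      pvB_mem, pvB_mem, PySem.Set.mem_ofList]
    simp only [List.mem_singleton, ← horigin]
    tauto
  have hlen : LA.length = LB.length := by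
    rw [← List.toFinset_card_of_nodup hNA, ← List.toFinset_card_of_nodup hNB, hfin]
  exact_mod_cast congrArg (Nat.cast : Nat → Int) hlen
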